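-- pv_equiv track=rewrite | github.com/i1red/algorithms-and-complexity-3rd-sem | fibo_sort_lab/fibo_sort.py | hor_distr
-- ===== SOURCE A (Python) =====
-- def hor_distr(runs_quantity, files_quantity):
--     distribution = [0 for i in range(files_quantity)]
--     tmp = list(distribution)
--     distribution[0] = 1
--
--     while sum(distribution) < runs_quantity:
--         max_val = max(distribution)
--         index = distribution.index(max_val)
--         for i in range(files_quantity):
--             tmp[i] = 0 if i == index else tmp[i] + max_val
--         distribution = list(tmp)
--
--     return sorted(distribution, reverse=True)
-- ===== SOURCE B (Python) =====
-- def hor_distr(runs_quantity, files_quantity):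
--     # Polyphase distribution via k-step Fibonacci numbers: keep only a 1-D
--     # sequence u and a running total s; assemble the distribution once at the end.
--     n = files_quantity
--     k = n - 1  # merge order (one file is the merge output)
--     if runs_quantity <= 1:
--         # level 0: a single run on the first file
--         return [1] + [0] * k
--     # u[l] = u[l-1] + ... + u[l-k] (u[0] = 1); s = total run count of the level
--     u = [1]
--     s = k
--     while s < runs_quantity:
--         x = sum(u[-k:])
--         s += (k - 1) * x
--         u.append(x)
--     # file i ideally holds the sum of the last k - i values of u
--     u.reverse()
--     return [sum(u[:k - i]) for i in range(n)]
-- ===== Notes on version B (the rewrite author's own statement) =====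
-- stated objective: alternative
-- what changed: B never simulates the n-slot distribution: it grows a single 1-D k-step Fibonacci sequence u plus a scalar running total, and assembles the final distribution once at the end as prefix sums of the reversed sequence, versus A's per-level rebuild of the whole list with sum/max/index scans and a final sort.
import Mathlib
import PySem

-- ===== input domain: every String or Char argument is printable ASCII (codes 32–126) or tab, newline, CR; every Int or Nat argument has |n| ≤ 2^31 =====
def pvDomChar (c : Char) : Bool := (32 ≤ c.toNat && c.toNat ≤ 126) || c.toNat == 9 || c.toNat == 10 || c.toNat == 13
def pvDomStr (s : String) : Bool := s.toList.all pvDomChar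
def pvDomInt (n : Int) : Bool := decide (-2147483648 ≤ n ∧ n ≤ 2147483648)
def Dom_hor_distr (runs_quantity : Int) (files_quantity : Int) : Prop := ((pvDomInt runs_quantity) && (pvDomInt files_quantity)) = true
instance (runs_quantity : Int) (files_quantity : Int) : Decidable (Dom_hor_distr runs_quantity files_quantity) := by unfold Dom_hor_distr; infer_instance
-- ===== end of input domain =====

-- B replaces A's per-level rebuild of the whole n-slot list (sum/max/index scans, tmp buffer,
-- final sort) by a single 1-D k-step Fibonacci sequence with a running total, assembling the
-- distribution once at the end (objective: alternative).

-- ===== PORT A =====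
-- A's while loop; the state (distribution, tmp) is exactly the Python's. The fuel argument only
-- makes the recursion total: on every Pre_ input the loop exits before runs_quantity.toNat + 1 levels.
def horLoopA (runs_quantity : Int) (files_quantity : Int) :
    Nat → List Int → List Int → List Int
  | 0, distribution, _tmp => PySem.List.sorted distribution (fun x => x) true
  | fuel + 1, distribution, tmp =>
      if distribution.sum < runs_quantity then
        let max_val := (PySem.List.max? distribution (fun x => x)).getD 0
        let index := (PySem.List.index? distribution max_val).getD 0
        let tmp' := (PySem.List.pyRange 0 files_quantity 1).map
          (fun i => if i = (index : Int) then 0 else PySem.List.pyGetD tmp i 0 + max_val)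
        horLoopA runs_quantity files_quantity fuel tmp' tmp'
      else PySem.List.sorted distribution (fun x => x) true

def hor_distr (runs_quantity : Int) (files_quantity : Int) : List Int :=
  let distribution := List.replicate files_quantity.toNat (0 : Int)
  let tmp := distribution
  let distribution := distribution.set 0 1  -- distribution[0] = 1 (IndexError for files_quantity ≤ 0: excluded by Pre_)
  horLoopA runs_quantity files_quantity (runs_quantity.toNat + 1) distribution tmp

-- ===== PORT B =====
-- Source B's while loop over (u, s): append the k-window sum, bump the running total.
-- Fuel runs_quantity.toNat only makes it total; on Pre_ inputs the loop exits earlier.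
def bLoop (runs_quantity : Int) (k : Int) : Nat → List Int → Int → List Int
  | 0, u, _s => u
  | fuel + 1, u, s =>
      if s < runs_quantity then
        let x := (PySem.List.slice u (some (-k)) none).sum   -- sum(u[-k:])
        bLoop runs_quantity k fuel (u ++ [x]) (s + (k - 1) * x)
      else u

-- Source B's final comprehension: [sum(u[:k - i]) for i in range(n)] (u already reversed)
def bOut (n : Int) (k : Int) (u : List Int) : List Int :=
  (PySem.List.pyRange 0 n 1).map
    (fun i => (PySem.List.slice u none (some (k - i))).sum)

def hor_distr_alt (runs_quantity : Int) (files_quantity : Int) : List Int :=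
  let n := files_quantity
  let k := n - 1
  if runs_quantity ≤ 1 then
    1 :: List.replicate k.toNat 0            -- [1] + [0] * k
  else
    let u := bLoop runs_quantity k runs_quantity.toNat [1] k
    bOut n k u.reverse

-- ===== PRECONDITION & SPEC =====
-- Pre_ excludes files_quantity ≤ 0 (A raises IndexError on `distribution[0] = 1`) and
-- files_quantity ∈ {1, 2} with runs_quantity > 1 (A's while loop never terminates there).
def Pre_hor_distr (runs_quantity : Int) (files_quantity : Int) : Prop :=
  1 ≤ files_quantity ∧ (runs_quantity ≤ 1 ∨ 3 ≤ files_quantity)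
instance (runs_quantity : Int) (files_quantity : Int) : Decidable (Pre_hor_distr runs_quantity files_quantity) := by unfold Pre_hor_distr; infer_instance
def pvWitness_hor_distr : Int × Int := (17, 3)

def Spec_hor_distr (runs_quantity : Int) (files_quantity : Int) (out : List Int) : Prop := out = hor_distr_alt runs_quantity files_quantity
instance (runs_quantity : Int) (files_quantity : Int) (out : List Int) : Decidable (Spec_hor_distr runs_quantity files_quantity out) := by unfold Spec_hor_distr; infer_instance

-- ===== CLAIM (what is proved, stated in full; the proofs are below) =====
def Claim_equal_hor_distr : Prop := ∀ (runs_quantity : Int) (files_quantity : Int), Dom_hor_distr runs_quantity files_quantity → Pre_hor_distr runs_quantity files_quantity → Spec_hor_distr runs_quantity files_quantity (hor_distr runs_quantity files_quantity)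

-- ===== LEMMAS AND PROOFS =====

-- the sorted-descending level recurrence: intermediate bridge between A's and B's loops
def descLoop (runs_quantity : Int) (files_quantity : Int) : Nat → List Int → List Int
  | 0, dist => dist
  | fuel + 1, dist =>
      if dist.sum < runs_quantity then
        descLoop runs_quantity files_quantity fuel
          (((PySem.List.pyRange 0 (files_quantity - 1) 1).map
              (fun i => PySem.List.pyGetD dist 0 0 + PySem.List.pyGetD dist (i + 1) 0)) ++ [0])
      else dist

def sortedD (d : List Int) : List Int := PySem.List.sorted d (fun x => x) true

theorem descUnique (xs ys : List Int) (hp : ys.Perm xs)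
    (hs : ys.Pairwise (fun a b => b ≤ a)) : sortedD xs = ys := by
  have h1 : (sortedD xs).Perm ys :=
    (PySem.List.sorted_perm xs (fun x => x) true).trans hp.symm
  have h2 : (sortedD xs).Pairwise (fun a b : Int => b ≤ a) := by
    have := PySem.List.sorted_pairwise_rev (xs := xs) (key := fun x : Int => x)
    simpa [sortedD] using this
  exact h1.eq_of_pairwise (fun a b _ _ hab hba => le_antisymm hba hab) h2 hs

theorem sortedD_head (d : List Int) (hd : d ≠ []) (m : Int)
    (hm : PySem.List.max? d (fun x => x) = some m) :
    ∃ rest, sortedD d = m :: rest := by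
  have hne : sortedD d ≠ [] := by
    simpa [sortedD, PySem.List.sorted_eq_nil_iff] using hd
  obtain ⟨h, t, ht⟩ := List.exists_cons_of_ne_nil hne
  refine ⟨t, ?_⟩
  have hhmem : h ∈ d := by
    have : h ∈ sortedD d := by simp [ht]
    simpa [sortedD, PySem.List.mem_sorted] using this
  have hmmem : m ∈ d := PySem.List.max?_mem hm
  have h1 : h ≤ m := PySem.List.max?_isMax hm h hhmem
  have h2 : m ≤ h := PySem.List.key_head_sorted_rev_ge d (fun x => x) (by simpa [sortedD] using ht) m hmmem
  rw [ht, le_antisymm h1 h2]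

theorem stepA_eq_set (f : Int) (d : List Int) (hlen : d.length = f.toNat)
    (m : Int) (idx : Nat) :
    (PySem.List.pyRange 0 f 1).map
        (fun i => if i = (idx : Int) then 0 else PySem.List.pyGetD d i 0 + m)
      = (d.map (fun x => x + m)).set idx 0 := by
  apply List.ext_getElem
  · simp [PySem.List.length_pyRange_one, hlen]
  · intro k h1 h2
    have hk : k < f.toNat := by
      simpa [PySem.List.length_pyRange_one] using h1
    have hkd : k < d.length := by omega
    simp only [PySem.List.pyRange_one, List.getElem_map, List.getElem_range, List.getElem_set]
    have hcast : ((0 : Int) + (k : Int) = (idx : Int)) ↔ (idx = k) := by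
      constructor <;> intro h <;> omega
    by_cases hcase : idx = k
    · simp [hcase]
    · have : ¬ ((0 : Int) + (k : Int) = (idx : Int)) := by omega
      simp only [if_neg this, if_neg hcase]
      have : PySem.List.pyGetD d ((0 : Int) + (k : Int)) 0 = d[k] := by
        have := PySem.List.pyGetD_natCast (xs := d) (n := k) (d := (0:Int))
        have h0 : (0 : Int) + (k : Int) = ((k : Nat) : Int) := by omega
        rw [h0, this, List.getD_eq_getElem?_getD, List.getElem?_eq_getElem hkd]
        rfl
      rw [this]

theorem stepB_eq (f : Int) (s : List Int) (m : Int) (rest : List Int)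
    (hs : s = m :: rest) (hlen : s.length = f.toNat) (hf : 1 ≤ f) :
    ((PySem.List.pyRange 0 (f - 1) 1).map
        (fun i => PySem.List.pyGetD s 0 0 + PySem.List.pyGetD s (i + 1) 0)) ++ [0]
      = rest.map (fun x => x + m) ++ [0] := by
  have hr : rest.length = (f - 1).toNat := by
    subst hs; simp at hlen; omega
  congr 1
  apply List.ext_getElem
  · simp [PySem.List.length_pyRange_one, hr]
  · intro k h1 h2
    have hk : k < rest.length := by simpa using h2
    simp only [PySem.List.pyRange_one, List.getElem_map, List.getElem_range]
    have h0 : PySem.List.pyGetD s 0 0 = m := by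
      subst hs; exact PySem.List.pyGetD_zero_cons _ _ _
    have h1' : PySem.List.pyGetD s ((0 : Int) + (k : Int) + 1) 0 = rest[k] := by
      have hcast : (0 : Int) + (k : Int) + 1 = (((k + 1 : Nat)) : Int) := by push_cast; ring
      rw [hcast, PySem.List.pyGetD_natCast, hs]
      simp [List.getD_eq_getElem?_getD, List.getElem?_eq_getElem hk]
    rw [h0, h1']
    ring

theorem step_sorted (d : List Int)
    (hpos : ∀ x ∈ d, 0 ≤ x) (m : Int) (idx : Nat)
    (hm : PySem.List.max? d (fun x => x) = some m)
    (hidx : PySem.List.index? d m = some idx) (rest : List Int)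
    (hrest : sortedD d = m :: rest) :
    sortedD ((d.map (fun x => x + m)).set idx 0) = rest.map (fun x => x + m) ++ [0] := by
  obtain ⟨hk, hdk, -⟩ := PySem.List.getElem_of_index?_eq_some hidx
  have hmnn : 0 ≤ m := hpos m (PySem.List.max?_mem hm)
  have hkm : idx < (d.map (fun x => x + m)).length := by simpa using hk
  have p1 : ((d.map (fun x => x + m)).set idx 0).Perm
      (0 :: (d.eraseIdx idx).map (fun x => x + m)) := by
    have := List.set_perm_cons_eraseIdx hkm (0 : Int)
    simpa [List.eraseIdx_map] using this
  have pd : d.Perm (m :: d.eraseIdx idx) := by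
    have := List.getElem_cons_eraseIdx_perm hk
    rw [hdk] at this
    exact this.symm
  have ps : d.Perm (m :: rest) := by
    have h := PySem.List.sorted_perm d (fun x => x) true
    rw [show PySem.List.sorted d (fun x => x) true = sortedD d from rfl, hrest] at h
    exact h.symm
  have per : (d.eraseIdx idx).Perm rest := (pd.symm.trans ps).cons_inv
  have p2 : (rest.map (fun x => x + m) ++ [0]).Perm ((d.map (fun x => x + m)).set idx 0) := by
    exact (List.perm_append_singleton _ _).trans
      (((per.map _).cons 0).symm.trans p1.symm)
  have hrestmem : ∀ x ∈ rest, 0 ≤ x := by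
    intro x hx
    apply hpos
    exact ps.symm.subset (by simp [hx])
  have hpw : (sortedD d).Pairwise (fun a b : Int => b ≤ a) := by
    have := PySem.List.sorted_pairwise_rev (xs := d) (key := fun x : Int => x)
    simpa [sortedD] using this
  have hrestpw : rest.Pairwise (fun a b : Int => b ≤ a) := by
    rw [hrest] at hpw; exact hpw.of_cons
  have hdesc : (rest.map (fun x => x + m) ++ [0]).Pairwise (fun a b : Int => b ≤ a) := by
    rw [List.pairwise_append]
    refine ⟨hrestpw.map _ (fun a b h => by omega), by simp, ?_⟩
    intro a ha b hb
    simp at hb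
    subst hb
    obtain ⟨x, hx, rfl⟩ := List.mem_map.mp ha
    have := hrestmem x hx
    omega
  exact descUnique _ _ p2 hdesc

theorem loop_eq (r f : Int) (hf : 1 ≤ f) :
    ∀ (fuel : Nat) (d : List Int), d.length = f.toNat → (∀ x ∈ d, 0 ≤ x) →
      horLoopA r f fuel d d = descLoop r f fuel (sortedD d) := by
  intro fuel
  induction fuel with
  | zero => intro d _ _; simp [horLoopA, descLoop, sortedD]
  | succ n ih =>
    intro d hlen hpos
    have hsum : (sortedD d).sum = d.sum :=
      (PySem.List.sorted_perm d (fun x => x) true).sum_eq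
    by_cases hc : d.sum < r
    · have hdne : d ≠ [] := by
        intro h; subst h; simp at hlen; omega
      cases hmo : PySem.List.max? d (fun x => x) with
      | none => exact absurd (Iff.mp (PySem.List.max?_eq_none_iff d (fun x => x)) hmo) hdne
      | some m =>
        have hmem : m ∈ d := PySem.List.max?_mem hmo
        cases hio : PySem.List.index? d m with
        | none => exact absurd (Iff.mp (PySem.List.index?_eq_none_iff d m) hio) (fun h => h hmem)
        | some idx =>
          obtain ⟨hk, hdk, -⟩ := PySem.List.getElem_of_index?_eq_some hio
          obtain ⟨rest, hrest⟩ := sortedD_head d hdne m hmo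
          have hset := stepA_eq_set f d hlen m idx
          have hstep := step_sorted d hpos m idx hmo hio rest hrest
          have hlen' : ((d.map (fun x => x + m)).set idx 0).length = f.toNat := by
            simp [hlen]
          have hpos' : ∀ x ∈ (d.map (fun x => x + m)).set idx 0, 0 ≤ x := by
            intro x hx
            rcases List.mem_or_eq_of_mem_set hx with h | h
            · obtain ⟨y, hy, rfl⟩ := List.mem_map.mp h
              have := hpos y hy
              have := hpos m hmem
              omega
            · omega
          have hslen : (sortedD d).length = f.toNat := by
            show (PySem.List.sorted d (fun x => x) true).length = f.toNat
            rw [(PySem.List.sorted_perm d (fun x => x) true).length_eq]; exact hlen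
          rw [horLoopA, descLoop]
          simp only [hmo, hio, Option.getD_some, hsum, if_pos hc]
          rw [hset, stepB_eq f (sortedD d) m rest hrest hslen hf, ← hstep]
          exact ih _ hlen' hpos'
    · rw [horLoopA, descLoop]
      simp only [hsum, if_neg hc]
      rfl

theorem replicate_foldl_max : ∀ (k : Nat), (List.replicate k (0 : Int)).foldl max 1 = 1
  | 0 => rfl
  | k + 1 => by
      rw [List.replicate_succ, List.foldl_cons]
      simpa using replicate_foldl_max k

-- the very first level: tmp = [0,…,0] and distribution = [1,0,…,0] produce the same next state
theorem first_step (r f : Int) (hf : 1 ≤ f) :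
    hor_distr r f
      = horLoopA r f (r.toNat + 1) ((List.replicate f.toNat (0 : Int)).set 0 1)
          ((List.replicate f.toNat (0 : Int)).set 0 1) := by
  obtain ⟨k, hk⟩ : ∃ k, f.toNat = k + 1 := by
    refine ⟨f.toNat - 1, ?_⟩; omega
  have hd0 : (List.replicate f.toNat (0 : Int)).set 0 1 = 1 :: List.replicate k 0 := by
    rw [hk, List.replicate_succ]; rfl
  have htmp : List.replicate f.toNat (0 : Int) = 0 :: List.replicate k 0 := by
    rw [hk, List.replicate_succ]
  show horLoopA r f (r.toNat + 1) ((List.replicate f.toNat (0 : Int)).set 0 1)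
        (List.replicate f.toNat (0 : Int)) = _
  rw [horLoopA, horLoopA]
  by_cases hc : ((List.replicate f.toNat (0 : Int)).set 0 1).sum < r
  · simp only [if_pos hc]
    rw [hd0, PySem.List.max?_id_cons, replicate_foldl_max, Option.getD_some,
      PySem.List.index?_cons_self, Option.getD_some]
    have harg : (PySem.List.pyRange 0 f 1).map
          (fun i => if i = ((0 : Nat) : Int) then 0
            else PySem.List.pyGetD (List.replicate f.toNat (0 : Int)) i 0 + 1)
        = (PySem.List.pyRange 0 f 1).map
          (fun i => if i = ((0 : Nat) : Int) then 0
            else PySem.List.pyGetD (1 :: List.replicate k 0) i 0 + 1) := by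
      apply List.map_congr_left
      intro i hi
      obtain ⟨hi0, hif⟩ := PySem.List.mem_pyRange_one.mp hi
      by_cases h0 : i = ((0 : Nat) : Int)
      · simp [h0]
      · have hi1 : 1 ≤ i := by simp at h0; omega
        have hlen1 : i < ((List.replicate f.toNat (0 : Int)).length : Int) := by
          simp; omega
        have hlen2 : i < ((1 :: List.replicate k 0 : List Int).length : Int) := by
          simp; omega
        rw [if_neg h0, if_neg h0,
          PySem.List.pyGetD_eq_getElem _ _ hi0 hlen1,
          PySem.List.pyGetD_eq_getElem _ _ hi0 hlen2]
        obtain ⟨j, hj⟩ : ∃ j, i.toNat = j + 1 := ⟨i.toNat - 1, by omega⟩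
        have hjk : j < k := by simp at hlen2; omega
        simp [hj, htmp, List.getElem_replicate]
    rw [harg]
  · simp only [if_neg hc]

-- ===== B-side bridge: bOut over a cons, head, sum =====

theorem bOut_length (f k : Int) (v : List Int) :
    (bOut f k v).length = f.toNat := by
  simp [bOut, PySem.List.length_pyRange_one]

theorem bOut_getElem (f k : Int) (hk : k = f - 1) (hf : 1 ≤ f) (v : List Int)
    (i : Nat) (hi1 : i < (bOut f k v).length) :
    (bOut f k v)[i] = (v.take (k - i).toNat).sum := by
  have hi : i < f.toNat := by rwa [bOut_length] at hi1
  simp only [bOut, PySem.List.pyRange_one, List.getElem_map, List.getElem_range]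
  have h0 : k - ((0:Int) + (i:Int)) = k - i := by omega
  rw [h0, PySem.List.slice_to _ (by omega)]

theorem bOut_ne_nil (f k : Int) (hf : 1 ≤ f) (v : List Int) : bOut f k v ≠ [] := by
  intro h
  have := bOut_length f k v
  rw [h] at this
  simp at this
  omega

theorem bOut_cons (f k : Int) (hk : k = f - 1) (hf : 3 ≤ f) (x : Int) (v : List Int) :
    bOut f k (x :: v) = (bOut f k v).tail.map (fun y => x + y) ++ [0] := by
  have htl : (bOut f k v).tail.length = f.toNat - 1 := by
    simp [bOut_length]
  apply List.ext_getElem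
  · simp [bOut_length]; omega
  · intro i hi1 hi2
    have hif : i < f.toNat := by rwa [bOut_length] at hi1
    rw [bOut_getElem f k hk (by omega) (x :: v) i hi1]
    by_cases hc : i < f.toNat - 1
    · rw [List.getElem_append_left (by simp only [List.length_map]; omega)]
      simp only [List.getElem_map]
      have h2 : (bOut f k v).tail[i]'(by omega) = (bOut f k v)[i+1]'(by rw [bOut_length]; omega) := by
        rw [List.getElem_tail]
      rw [h2, bOut_getElem f k hk (by omega) v (i+1) (by rw [bOut_length]; omega)]
      have hsucc : (k - i).toNat = (k - (i+1:Nat)).toNat + 1 := by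
        push_cast; omega
      rw [hsucc, List.take_succ_cons, List.sum_cons]
    · have hieq : i = f.toNat - 1 := by omega
      rw [List.getElem_append_right (by simp only [List.length_map]; omega)]
      have h0 : (k - (i:Int)).toNat = 0 := by omega
      simp only [List.length_map, htl, h0, List.take_zero, List.sum_nil]
      simp

theorem bOut_nil (f k : Int) (hk : k = f - 1) (hf : 1 ≤ f) :
    bOut f k ([] : List Int) = List.replicate f.toNat 0 := by
  apply List.ext_getElem
  · simp [bOut_length]
  · intro i hi1 hi2
    rw [bOut_getElem f k hk hf [] i hi1]
    simp

theorem bOut_head (f k : Int) (hk : k = f - 1) (hf : 3 ≤ f) (v : List Int) :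
    ∃ t, bOut f k v = (v.take k.toNat).sum :: t := by
  obtain ⟨h, t, ht⟩ := List.exists_cons_of_ne_nil (bOut_ne_nil f k (by omega) v)
  refine ⟨t, ?_⟩
  rw [ht]
  have h0 : (bOut f k v)[0]'(by rw [bOut_length]; omega) = h := by simp [ht]
  rw [bOut_getElem f k hk (by omega) v 0 (by rw [bOut_length]; omega)] at h0
  rw [← h0]
  norm_num

theorem sum_map_add_left (x : Int) : ∀ (t : List Int),
    (t.map (fun y => x + y)).sum = t.length * x + t.sum
  | [] => by simp
  | a :: t => by
      simp [sum_map_add_left x t]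
      ring

-- x = sum(u[-k:]) is the head of bOut applied to the reversed sequence
theorem slice_last_sum (k : Int) (hk : 1 ≤ k) (u : List Int) :
    (PySem.List.slice u (some (-k)) none).sum = (u.reverse.take k.toNat).sum := by
  have hkk : (-k) = -((k.toNat : Nat) : Int) := by omega
  rw [hkk, PySem.List.slice_from_neg_natCast u k.toNat (by omega), List.take_reverse,
    List.sum_reverse_int]

-- ===== lockstep: descLoop on bOut states = bLoop on (u, s) =====
theorem lockstep (r f k : Int) (hk : k = f - 1) (hf : 3 ≤ f) :
    ∀ (fuel : Nat) (u : List Int) (s : Int), s = (bOut f k u.reverse).sum →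
      descLoop r f fuel (bOut f k u.reverse) = bOut f k (bLoop r k fuel u s).reverse := by
  intro fuel
  induction fuel with
  | zero => intro u s _; rfl
  | succ n ih =>
    intro u s hs
    rw [descLoop, bLoop]
    obtain ⟨t, ht⟩ := bOut_head f k hk hf u.reverse
    have hxh : (PySem.List.slice u (some (-k)) none).sum = (u.reverse.take k.toNat).sum :=
      slice_last_sum k (by omega) u
    by_cases hc : s < r
    · rw [if_pos (by rw [hs] at hc; exact hc), if_pos hc]
      have hrev : (u ++ [(PySem.List.slice u (some (-k)) none).sum]).reverse
          = (PySem.List.slice u (some (-k)) none).sum :: u.reverse := by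
        simp
      have hstep : ((PySem.List.pyRange 0 (f - 1) 1).map
            (fun i => PySem.List.pyGetD (bOut f k u.reverse) 0 0
              + PySem.List.pyGetD (bOut f k u.reverse) (i + 1) 0)) ++ [0]
          = bOut f k ((PySem.List.slice u (some (-k)) none).sum :: u.reverse) := by
        rw [stepB_eq f (bOut f k u.reverse) ((u.reverse.take k.toNat).sum) t ht
            (bOut_length f k u.reverse) (by omega),
          bOut_cons f k hk hf _ u.reverse, ht, List.tail_cons]
        congr 1
        exact List.map_congr_left fun y _ => by rw [hxh]; ring
      rw [hstep, ← hrev]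
      apply ih
      rw [hrev, bOut_cons f k hk hf _ u.reverse, ht, List.tail_cons]
      have htlen : (t.length : Int) = k := by
        have := bOut_length f k u.reverse
        rw [ht] at this
        simp at this
        omega
      have hsum : s = (u.reverse.take k.toNat).sum + t.sum := by
        rw [hs, ht]; simp
      rw [List.sum_append, sum_map_add_left, hxh, htlen, hsum]
      simp
      ring
    · rw [if_neg (by rw [hs] at hc; exact hc), if_neg hc]

-- the state after A's first level equals bOut of the seed sequence [1], with total k
theorem bOut_one (f k : Int) (hk : k = f - 1) (hf : 3 ≤ f) :
    bOut f k [(1 : Int)] = (List.replicate (f.toNat - 1) (0 : Int)).map (fun x => x + 1) ++ [0] := by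
  have h1 : ([(1 : Int)] : List Int) = 1 :: [] := rfl
  rw [h1, bOut_cons f k hk hf, bOut_nil f k hk (by omega)]
  obtain ⟨m, hm⟩ : ∃ m, f.toNat = m + 1 := ⟨f.toNat - 1, by omega⟩
  rw [hm, List.replicate_succ, List.tail_cons]
  simp [List.map_replicate]

-- ===== VERDICT (by name: the statement is the Claim_ definition above) =====
theorem hor_distr_spec : Claim_equal_hor_distr := by
  unfold Claim_equal_hor_distr
  intro r f _hdom hpre
  obtain ⟨hf1, hor⟩ := hpre
  unfold Spec_hor_distr
  obtain ⟨k0, hk0⟩ : ∃ m, f.toNat = m + 1 := ⟨f.toNat - 1, by omega⟩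
  have hd0 : (List.replicate f.toNat (0 : Int)).set 0 1 = 1 :: List.replicate k0 0 := by
    rw [hk0, List.replicate_succ]; rfl
  have hsum0 : ((List.replicate f.toNat (0 : Int)).set 0 1).sum = 1 := by
    rw [hd0]; simp
  have hsd : sortedD ((List.replicate f.toNat (0 : Int)).set 0 1)
      = (List.replicate f.toNat (0 : Int)).set 0 1 := by
    apply descUnique _ _ (List.Perm.refl _)
    rw [hd0]
    refine List.pairwise_cons.mpr ⟨?_, ?_⟩
    · intro y hy; rw [List.eq_of_mem_replicate hy]; omega
    · exact List.pairwise_replicate.mpr (Or.inr le_rfl)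
  by_cases hr : r ≤ 1
  · -- A's loop exits immediately; B returns the literal seed distribution
    rw [first_step r f hf1, horLoopA]
    rw [if_neg (by omega)]
    show sortedD _ = _
    rw [hsd, hd0]
    unfold hor_distr_alt
    rw [if_pos hr]
    have : (f - 1).toNat = k0 := by omega
    rw [this]
  · -- r ≥ 2, hence f ≥ 3: one explicit first level, then lockstep
    have hf3 : 3 ≤ f := by rcases hor with h | h; omega; exact h
    rw [first_step r f hf1,
      loop_eq r f hf1 (r.toNat + 1) _ (by simp) (by
        intro x hx
        rcases List.mem_or_eq_of_mem_set hx with h | h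
        · rw [List.eq_of_mem_replicate h]
        · omega),
      hsd, descLoop, if_pos (by omega)]
    rw [stepB_eq f _ 1 (List.replicate k0 0) hd0 (by simp) hf1]
    have hk0' : k0 = f.toNat - 1 := by omega
    have hstep1 : (List.replicate k0 (0:Int)).map (fun x => x + 1) ++ [0]
        = bOut f (f - 1) (([(1:Int)]).reverse) := by
      rw [List.reverse_singleton, bOut_one f (f-1) rfl hf3, hk0']
    rw [hstep1, lockstep r f (f - 1) rfl hf3 r.toNat [1] (f - 1) ?hs]
    · unfold hor_distr_alt
      rw [if_neg hr]
    case hs =>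
      rw [List.reverse_singleton, bOut_one f (f-1) rfl hf3]
      simp [List.map_replicate, List.sum_replicate]
      omega
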